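-- pv_equiv track=rewrite | github.com/Geniolle/AppVerboBraga | appverbo/services/profile.py | is_meu_perfil_builtin_duplicate_field
-- ===== SOURCE A (Python) =====
-- import unicodedata
-- from typing import Any
--
-- def _normalize_process_rule_lookup_text(raw_value: Any) -> str:
--     clean_value = str(raw_value or "").strip().lower()
--     if not clean_value:
--         return ""
--     normalized = unicodedata.normalize("NFD", clean_value)
--     return "".join(char for char in normalized if unicodedata.category(char) != "Mn")
--
-- def _normalize_meu_perfil_duplicate_lookup_text(raw_value: Any) -> str:
--     normalized = _normalize_process_rule_lookup_text(raw_value)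
--     if not normalized:
--         return ""
--     return " ".join(normalized.replace("_", " ").replace("-", " ").split())
--
-- def is_meu_perfil_builtin_duplicate_field(
--     field_key: Any,
--     field_label: Any,
--     builtin_field_labels: dict[str, str] | None = None,
-- ) -> bool:
--     clean_key = str(field_key or "").strip().lower()
--     if not clean_key.startswith("custom_"):
--         return False
--
--     builtin_labels = builtin_field_labels or {}
--     builtin_lookup_values: set[str] = set()
--
--     for builtin_key, builtin_label in builtin_labels.items():
--         normalized_key = _normalize_meu_perfil_duplicate_lookup_text(builtin_key)
--         normalized_label = _normalize_meu_perfil_duplicate_lookup_text(builtin_label)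
--
--         if normalized_key:
--             builtin_lookup_values.add(normalized_key)
--         if normalized_label:
--             builtin_lookup_values.add(normalized_label)
--
--     if not builtin_lookup_values:
--         return False
--
--     normalized_custom_key = _normalize_meu_perfil_duplicate_lookup_text(clean_key.removeprefix("custom_"))
--     normalized_custom_label = _normalize_meu_perfil_duplicate_lookup_text(field_label)
--
--     return (
--         (normalized_custom_key in builtin_lookup_values if normalized_custom_key else False)
--         or (normalized_custom_label in builtin_lookup_values if normalized_custom_label else False)
--     )
-- ===== SOURCE B (Python) =====
-- from typing import Any
--
-- _MEU_PERFIL_SEPARATORS = " \t\n\r\x0b\x0c_-"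
--
--
-- def _canonical_meu_perfil_text(raw_value: Any) -> str:
--     # One character-level scan: lowercase, collapse runs of whitespace/underscore/hyphen
--     # into a single inner space, dropping leading/trailing separators.
--     out: list[str] = []
--     pending = False
--     for char in str(raw_value or "").lower():
--         if char in _MEU_PERFIL_SEPARATORS:
--             pending = True
--         else:
--             if pending and out:
--                 out.append(" ")
--             out.append(char)
--             pending = False
--     return "".join(out)
--
--
-- def is_meu_perfil_builtin_duplicate_field(
--     field_key: Any,
--     field_label: Any,
--     builtin_field_labels: dict[str, str] | None = None,
-- ) -> bool:
--     clean_key = str(field_key or "").strip().lower()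
--     if not clean_key.startswith("custom_"):
--         return False
--
--     targets = {
--         t
--         for t in (
--             _canonical_meu_perfil_text(clean_key[len("custom_"):]),
--             _canonical_meu_perfil_text(field_label),
--         )
--         if t
--     }
--     if not targets:
--         return False
--
--     flat: list = []
--     for pair in (builtin_field_labels or {}).items():
--         flat.extend(pair)
--     return any(_canonical_meu_perfil_text(value) in targets for value in flat)
-- ===== Notes on version B (the rewrite author's own statement) =====
-- stated objective: alternative
-- what changed: B replaces A's strip/replace/replace/split/join normalization pipeline with a single character-level scan (a pending-separator automaton over whitespace/underscore/hyphen), inverts the matching direction (it builds the set of non-empty normalized CUSTOM targets instead of A's set of normalized builtin values), flattens the builtin dict into one stream of strings, and answers with a single any() membership scan against the targets.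
import Mathlib
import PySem

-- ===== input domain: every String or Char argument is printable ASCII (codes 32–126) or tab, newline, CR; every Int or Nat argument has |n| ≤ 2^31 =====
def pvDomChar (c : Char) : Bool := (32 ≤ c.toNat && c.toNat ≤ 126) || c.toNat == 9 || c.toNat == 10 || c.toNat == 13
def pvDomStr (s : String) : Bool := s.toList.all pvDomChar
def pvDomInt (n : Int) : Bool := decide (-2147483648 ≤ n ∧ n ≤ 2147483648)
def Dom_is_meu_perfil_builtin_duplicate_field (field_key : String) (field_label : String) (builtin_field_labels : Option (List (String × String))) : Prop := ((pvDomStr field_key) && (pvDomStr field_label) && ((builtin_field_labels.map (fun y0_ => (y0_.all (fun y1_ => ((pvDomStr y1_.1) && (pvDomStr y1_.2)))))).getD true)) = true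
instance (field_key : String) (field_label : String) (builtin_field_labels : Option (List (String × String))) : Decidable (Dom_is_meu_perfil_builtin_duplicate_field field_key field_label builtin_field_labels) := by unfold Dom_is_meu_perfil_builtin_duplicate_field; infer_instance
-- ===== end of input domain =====

-- B replaces A's strip/replace/replace/split/join normalization pipeline with a single
-- character-level scan, builds the set of normalized CUSTOM targets (instead of A's set of
-- builtin values) and answers with one any() over the flattened builtin key/label stream
-- (objective: alternative; return value only, no argument is mutated).

-- ===== PORT A =====
-- _normalize_process_rule_lookup_text: on the printable-ASCII input domain (Dom_) NFD
-- normalization is the identity and no character has category "Mn", so the unicodedata steps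
-- are identity; exact there.  'str(raw_value or "")' on a String argument is the string itself.
def pvNormalize (s : String) : String :=
  let clean := PySem.Str.lower (PySem.Str.strip s)
  if clean = "" then "" else clean

-- _normalize_meu_perfil_duplicate_lookup_text
def pvNormalizeDup (s : String) : String :=
  let n := pvNormalize s
  if n = "" then ""
  else PySem.Str.join " " (PySem.Str.split₀ (PySem.Str.replace (PySem.Str.replace n "_" " ") "-" " "))

-- str.removeprefix (not in PySem): exact by Python's definition
def pyRemoveprefix (s p : String) : String :=
  if PySem.Str.startswith s p then PySem.Str.slice s (some (PySem.Str.len p : Int)) none else s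

def is_meu_perfil_builtin_duplicate_field (field_key : String) (field_label : String) (builtin_field_labels : Option (List (String × String))) : Bool :=
  let clean_key := PySem.Str.lower (PySem.Str.strip field_key)
  if !PySem.Str.startswith clean_key "custom_" then false
  else
    let builtin_labels := builtin_field_labels.getD []   -- builtin_field_labels or {}
    let builtin_lookup_values : PySem.Set String :=
      builtin_labels.foldl (fun acc kv =>
        let normalized_key := pvNormalizeDup kv.1
        let normalized_label := pvNormalizeDup kv.2
        let acc := if normalized_key ≠ "" then PySem.Set.add acc normalized_key else acc
        if normalized_label ≠ "" then PySem.Set.add acc normalized_label else acc)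
        PySem.Set.empty
    if builtin_lookup_values.isEmpty then false
    else
      let normalized_custom_key := pvNormalizeDup (pyRemoveprefix clean_key "custom_")
      let normalized_custom_label := pvNormalizeDup field_label
      (if normalized_custom_key ≠ "" then PySem.Set.contains builtin_lookup_values normalized_custom_key else false)
      || (if normalized_custom_label ≠ "" then PySem.Set.contains builtin_lookup_values normalized_custom_label else false)

-- ===== PORT B =====
-- _MEU_PERFIL_SEPARATORS = " \t\n\r\x0b\x0c_-"
def altSeps : List Char := [' ', '\t', '\n', '\r', Char.ofNat 11, Char.ofNat 12, '_', '-']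

-- one iteration of _canonical_meu_perfil_text's for-loop (state: out, pending)
def altStep (st : List Char × Bool) (ch : Char) : List Char × Bool :=
  if ch ∈ altSeps then (st.1, true)
  else (st.1 ++ (if st.2 && !st.1.isEmpty then [' ', ch] else [ch]), false)

-- _canonical_meu_perfil_text (like A's helpers, exact on the ASCII domain where .lower() is)
def altCanon (s : String) : String :=
  String.ofList (((PySem.Str.lower s).toList.foldl altStep ([], false)).1)

def is_meu_perfil_builtin_duplicate_field_alt (field_key : String) (field_label : String) (builtin_field_labels : Option (List (String × String))) : Bool :=
  let clean_key := PySem.Str.lower (PySem.Str.strip field_key)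
  if !PySem.Str.startswith clean_key "custom_" then false
  else
    let targets : PySem.Set String :=
      PySem.Set.ofList (([altCanon (PySem.Str.slice clean_key (some (PySem.Str.len "custom_" : Int)) none),
                          altCanon field_label]).filter (fun t => t ≠ ""))
    if targets.isEmpty then false
    else
      let flat : List String :=
        (builtin_field_labels.getD []).foldl (fun acc pair => acc ++ [pair.1, pair.2]) []
      flat.any (fun value => PySem.Set.contains targets (altCanon value))

-- ===== PRECONDITION & SPEC =====
def Spec_is_meu_perfil_builtin_duplicate_field (field_key : String) (field_label : String) (builtin_field_labels : Option (List (String × String))) (out : Bool) : Prop := out = is_meu_perfil_builtin_duplicate_field_alt field_key field_label builtin_field_labels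
instance (field_key : String) (field_label : String) (builtin_field_labels : Option (List (String × String))) (out : Bool) : Decidable (Spec_is_meu_perfil_builtin_duplicate_field field_key field_label builtin_field_labels out) := by unfold Spec_is_meu_perfil_builtin_duplicate_field; infer_instance

-- ===== CLAIM (what is proved, stated in full; the proofs are below) =====
def Claim_equal_is_meu_perfil_builtin_duplicate_field : Prop := ∀ (field_key : String) (field_label : String) (builtin_field_labels : Option (List (String × String))), Dom_is_meu_perfil_builtin_duplicate_field field_key field_label builtin_field_labels → Spec_is_meu_perfil_builtin_duplicate_field field_key field_label builtin_field_labels (is_meu_perfil_builtin_duplicate_field field_key field_label builtin_field_labels)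

-- ===== LEMMAS AND PROOFS =====

-- ---- characters ----
theorem pv_char_eq_iff (c d : Char) : c = d ↔ c.toNat = d.toNat :=
  ⟨fun h => h ▸ rfl, fun h => Char.ext (UInt32.toNat_inj.mp h)⟩

-- the fused single-character effect of A's two replace passes ('_'→' ', then '-'→' ')
def pvSub (c : Char) : Char := if c = '_' then ' ' else if c = '-' then ' ' else c

theorem pv_mem_altSeps (c : Char) :
    c ∈ altSeps ↔ (c.toNat = 32 ∨ c.toNat = 9 ∨ c.toNat = 10 ∨ c.toNat = 13 ∨
      c.toNat = 11 ∨ c.toNat = 12 ∨ c.toNat = 95 ∨ c.toNat = 45) := by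
  have h11 : (Char.ofNat 11).toNat = 11 := by decide
  have h12 : (Char.ofNat 12).toNat = 12 := by decide
  simp [altSeps, pv_char_eq_iff, h11, h12]

theorem pv_isspace_iff (c : Char) :
    PySem.Chars.isspace c = true ↔ (c.toNat = 32 ∨ (9 ≤ c.toNat ∧ c.toNat ≤ 13) ∨
      (28 ≤ c.toNat ∧ c.toNat ≤ 31) ∨ c.toNat = 133 ∨ c.toNat = 160 ∨ c.toNat = 5760 ∨
      (8192 ≤ c.toNat ∧ c.toNat ≤ 8202) ∨ c.toNat = 8232 ∨ c.toNat = 8233 ∨ c.toNat = 8239 ∨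
      c.toNat = 8287 ∨ c.toNat = 12288) := by
  simp [PySem.Chars.isspace]; tauto

theorem pv_sep_isspace (c : Char) (h : c ∈ altSeps) : PySem.Chars.isspace (pvSub c) = true := by
  fin_cases h <;> decide

theorem pv_sub_eq_self (c : Char) (h : c ∉ altSeps) : pvSub c = c := by
  simp only [altSeps, List.mem_cons, not_or] at h
  simp [pvSub, h.2.2.2.2.2.2.1, h.2.2.2.2.2.2.2]

theorem pv_nonsep_isspace (c : Char) (hd : pvDomChar c = true) (h : c ∉ altSeps) :
    PySem.Chars.isspace (pvSub c) = false := by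
  rw [pv_sub_eq_self c h, ← Bool.not_eq_true]
  rw [pv_mem_altSeps] at h
  simp only [pvDomChar, Bool.or_eq_true, Bool.and_eq_true, decide_eq_true_eq, beq_iff_eq] at hd
  simp only [pv_isspace_iff]
  omega

theorem pv_isspace_fix (c : Char) (h : PySem.Chars.isspace c = true) : pvSub c = c := by
  rw [pv_isspace_iff] at h
  have h95 : c ≠ '_' := by simp only [ne_eq, pv_char_eq_iff]; change ¬ _ = 95; omega
  have h45 : c ≠ '-' := by simp only [ne_eq, pv_char_eq_iff]; change ¬ _ = 45; omega
  simp [pvSub, h95, h45]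

theorem pv_isspace_lowerChar (c : Char) :
    PySem.Chars.isspace (PySem.Chars.lowerChar c) = PySem.Chars.isspace c := by
  unfold PySem.Chars.lowerChar
  split
  · next hu =>
    simp only [PySem.Chars.isupper, Char.le_def, UInt32.le_iff_toNat_le, Bool.and_eq_true,
      decide_eq_true_eq] at hu
    have hcv : c.toNat = c.val.toNat := rfl
    have hA : ('A').val.toNat = 65 := by decide
    have hZ : ('Z').val.toNat = 90 := by decide
    rw [hA, hZ] at hu
    have h1 : (Char.ofNat (c.toNat + 32)).toNat = c.toNat + 32 := by
      rw [Char.toNat_ofNat]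
      have : (c.toNat + 32).isValidChar := by unfold Nat.isValidChar; left; omega
      simp [this]
    rw [Bool.eq_iff_iff, pv_isspace_iff, pv_isspace_iff, h1]
    omega
  · rfl

theorem pv_domChar_lowerChar (c : Char) (h : pvDomChar c = true) :
    pvDomChar (PySem.Chars.lowerChar c) = true := by
  unfold PySem.Chars.lowerChar
  split
  · next hu =>
    simp only [PySem.Chars.isupper, Char.le_def, UInt32.le_iff_toNat_le, Bool.and_eq_true,
      decide_eq_true_eq] at hu
    have hcv : c.toNat = c.val.toNat := rfl
    have hA : ('A').val.toNat = 65 := by decide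
    have hZ : ('Z').val.toNat = 90 := by decide
    rw [hA, hZ] at hu
    have h1 : (Char.ofNat (c.toNat + 32)).toNat = c.toNat + 32 := by
      rw [Char.toNat_ofNat]
      have : (c.toNat + 32).isValidChar := by unfold Nat.isValidChar; left; omega
      simp [this]
    simp only [pvDomChar, h1, Bool.or_eq_true, Bool.and_eq_true, decide_eq_true_eq, beq_iff_eq]
    omega
  · exact h

-- ---- split₀.go bookkeeping ----
theorem pv_go_nil (cur : List Char) (acc : List (List Char)) :
    PySem.Chars.split₀.go [] cur acc =
      if cur.isEmpty then acc.reverse else (cur.reverse :: acc).reverse := by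
  simp only [PySem.Chars.split₀.go]

theorem pv_go_cons_ws (c : Char) (rest cur : List Char) (acc : List (List Char))
    (h : PySem.Chars.isspace c = true) (hcur : cur = []) :
    PySem.Chars.split₀.go (c :: rest) cur acc = PySem.Chars.split₀.go rest [] acc := by
  simp only [PySem.Chars.split₀.go, h, if_true, hcur, List.isEmpty_nil]

theorem pv_go_cons_ws' (c : Char) (rest cur : List Char) (acc : List (List Char))
    (h : PySem.Chars.isspace c = true) (hcur : cur ≠ []) :
    PySem.Chars.split₀.go (c :: rest) cur acc =
      PySem.Chars.split₀.go rest [] (cur.reverse :: acc) := by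
  simp only [PySem.Chars.split₀.go, h, if_true, List.isEmpty_iff, hcur, ite_false]

theorem pv_go_cons (c : Char) (rest cur : List Char) (acc : List (List Char))
    (h : PySem.Chars.isspace c = false) :
    PySem.Chars.split₀.go (c :: rest) cur acc = PySem.Chars.split₀.go rest (c :: cur) acc := by
  simp only [PySem.Chars.split₀.go, h, Bool.false_eq_true, if_false]

theorem pv_go_acc (m : List Char) : ∀ (cur : List Char) (acc : List (List Char)),
    PySem.Chars.split₀.go m cur acc = acc.reverse ++ PySem.Chars.split₀.go m cur [] := by
  induction m with
  | nil =>
    intro cur acc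
    rw [pv_go_nil, pv_go_nil]
    by_cases hcur : cur.isEmpty <;> simp [hcur]
  | cons c rest ih =>
    intro cur acc
    by_cases hs : PySem.Chars.isspace c = true
    · by_cases hcur : cur = []
      · rw [pv_go_cons_ws c rest cur acc hs hcur, pv_go_cons_ws c rest cur [] hs hcur, ih]
      · rw [pv_go_cons_ws' c rest cur acc hs hcur, pv_go_cons_ws' c rest cur [] hs hcur,
          ih _ (cur.reverse :: acc), ih _ [cur.reverse]]
        simp
    · rw [pv_go_cons c rest cur acc (by simpa using hs),
        pv_go_cons c rest cur [] (by simpa using hs), ih]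

theorem pv_go_ne (m : List Char) : ∀ (cur : List Char), cur ≠ [] →
    PySem.Chars.split₀.go m cur [] ≠ [] := by
  induction m with
  | nil => intro cur h; rw [pv_go_nil]; simp [h]
  | cons c rest ih =>
    intro cur h
    by_cases hs : PySem.Chars.isspace c = true
    · rw [pv_go_cons_ws' c rest cur [] hs h, pv_go_acc]
      simp
    · rw [pv_go_cons c rest cur [] (by simpa using hs)]
      exact ih (c :: cur) (by simp)

theorem pv_go_all_ws (ws : List Char) : ∀ (cur : List Char) (acc : List (List Char)),
    (∀ c ∈ ws, PySem.Chars.isspace c = true) →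
    PySem.Chars.split₀.go ws cur acc = PySem.Chars.split₀.go [] cur acc := by
  induction ws with
  | nil => intro cur acc _; rfl
  | cons c rest ih =>
    intro cur acc hws
    have hc := hws c (by simp)
    by_cases hcur : cur = []
    · rw [pv_go_cons_ws c rest cur acc hc hcur,
        ih [] acc (fun d hd => hws d (by simp [hd])), pv_go_nil, pv_go_nil]
      simp [hcur]
    · rw [pv_go_cons_ws' c rest cur acc hc hcur,
        ih [] (cur.reverse :: acc) (fun d hd => hws d (by simp [hd])), pv_go_nil, pv_go_nil]
      simp [hcur]

theorem pv_go_append_ws (m : List Char) (ws : List Char)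
    (hws : ∀ c ∈ ws, PySem.Chars.isspace c = true) :
    ∀ (cur : List Char) (acc : List (List Char)),
    PySem.Chars.split₀.go (m ++ ws) cur acc = PySem.Chars.split₀.go m cur acc := by
  induction m with
  | nil => intro cur acc; simpa using pv_go_all_ws ws cur acc hws
  | cons c rest ih =>
    intro cur acc
    by_cases hs : PySem.Chars.isspace c = true
    · by_cases hcur : cur = []
      · rw [List.cons_append, pv_go_cons_ws c _ cur acc hs hcur,
          pv_go_cons_ws c rest cur acc hs hcur, ih]
      · rw [List.cons_append, pv_go_cons_ws' c _ cur acc hs hcur,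
          pv_go_cons_ws' c rest cur acc hs hcur, ih]
    · rw [List.cons_append, pv_go_cons c _ cur acc (by simpa using hs),
        pv_go_cons c rest cur acc (by simpa using hs), ih]

theorem pv_go_ws_left (ws : List Char) (m : List Char)
    (hws : ∀ c ∈ ws, PySem.Chars.isspace c = true) (acc : List (List Char)) :
    PySem.Chars.split₀.go (ws ++ m) [] acc = PySem.Chars.split₀.go m [] acc := by
  induction ws with
  | nil => rfl
  | cons c rest ih =>
    have hc := hws c (by simp)
    rw [List.cons_append, pv_go_cons_ws c _ [] acc hc rfl]
    exact ih (fun d hd => hws d (by simp [hd]))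

-- ---- strip decomposition ----
theorem pv_strip_decomp (x : List Char) :
    ∃ ws1 ws2 : List Char, (∀ c ∈ ws1, PySem.Chars.isspace c = true) ∧
      (∀ c ∈ ws2, PySem.Chars.isspace c = true) ∧
      x = ws1 ++ PySem.Chars.strip x ++ ws2 := by
  refine ⟨x.takeWhile PySem.Chars.isspace,
    ((x.dropWhile PySem.Chars.isspace).reverse.takeWhile PySem.Chars.isspace).reverse,
    fun c hc => List.mem_takeWhile_imp hc,
    fun c hc => List.mem_takeWhile_imp (List.mem_reverse.mp hc), ?_⟩
  unfold PySem.Chars.strip PySem.Chars.rstrip PySem.Chars.lstrip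
  conv_lhs => rw [← List.takeWhile_append_dropWhile (p := PySem.Chars.isspace) (l := x)]
  rw [List.append_assoc, List.append_right_inj]
  conv_lhs => rw [← List.reverse_reverse (x.dropWhile PySem.Chars.isspace),
    ← List.takeWhile_append_dropWhile (p := PySem.Chars.isspace)
      (l := (x.dropWhile PySem.Chars.isspace).reverse)]
  rw [List.reverse_append]

theorem pv_strip_nil_all_ws (x : List Char) (h : PySem.Chars.strip x = []) :
    ∀ c ∈ x, PySem.Chars.isspace c = true := by
  obtain ⟨ws1, ws2, h1, h2, hx⟩ := pv_strip_decomp x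
  rw [h, List.append_nil] at hx
  intro c hc
  rw [hx] at hc
  rcases List.mem_append.mp hc with h' | h'
  · exact h1 c h'
  · exact h2 c h'

theorem pv_map_sub_ws (ws : List Char) (h : ∀ c ∈ ws, PySem.Chars.isspace c = true) :
    List.map pvSub ws = ws := by
  rw [List.map_congr_left (fun c hc => pv_isspace_fix c (h c hc))]
  simp

-- split₀ after the substitution ignores surrounding whitespace (pvSub fixes space chars)
theorem pv_split_strip (x : List Char) :
    PySem.Chars.split₀ (List.map pvSub (PySem.Chars.strip x)) =
      PySem.Chars.split₀ (List.map pvSub x) := by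
  obtain ⟨ws1, ws2, h1, h2, hx⟩ := pv_strip_decomp x
  unfold PySem.Chars.split₀
  conv_rhs => rw [hx]
  rw [List.map_append, List.map_append, pv_map_sub_ws _ h1, pv_map_sub_ws _ h2,
    List.append_assoc, pv_go_ws_left _ _ h1, pv_go_append_ws _ _ h2]

-- ---- A's character-replacement passes ----
theorem pv_replace_single_go (o n : Char) :
    ∀ (fuel : Nat) (l : List Char) (acc : List Char), l.length ≤ fuel →
      PySem.Chars.replace.go [o] [n] fuel l acc =
        acc.reverse ++ l.map (fun c => if c = o then n else c) := by
  intro fuel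
  induction fuel with
  | zero =>
    intro l acc h
    have : l = [] := by cases l <;> simp_all
    simp [this, PySem.Chars.replace.go]
  | succ fuel ih =>
    intro l acc h
    cases l with
    | nil => simp [PySem.Chars.replace.go]
    | cons c t =>
      by_cases hco : c = o
      · have hpre : List.isPrefixOf [o] (c :: t) = true := by simp [List.isPrefixOf, hco]
        simp only [PySem.Chars.replace.go, hpre, if_true]
        rw [ih _ _ (by simpa using Nat.le_of_succ_le_succ h)]
        simp [hco]
      · have hpre : List.isPrefixOf [o] (c :: t) = false := by
          simp [List.isPrefixOf]
          exact fun h' => absurd h'.symm hco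
        simp only [PySem.Chars.replace.go, hpre, Bool.false_eq_true, if_false]
        rw [ih _ _ (by simpa using Nat.le_of_succ_le_succ h)]
        simp [hco]

theorem pv_replace_single (l : List Char) (o n : Char) :
    PySem.Chars.replace l [o] [n] = l.map (fun c => if c = o then n else c) := by
  unfold PySem.Chars.replace
  simp only [List.isEmpty_cons, Bool.false_eq_true, if_false]
  simpa using pv_replace_single_go o n l.length l [] le_rfl

-- ---- the scan (pvR is the functional form of B's foldl) ----
def pvR (hasOut pending : Bool) : List Char → List Char
  | [] => []
  | c :: t =>
      if c ∈ altSeps then pvR hasOut true t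
      else (if pending && hasOut then [' ', c] else [c]) ++ pvR true false t

theorem pv_scan_foldl (t : List Char) : ∀ (out : List Char) (pending : Bool),
    (t.foldl altStep (out, pending)).1 = out ++ pvR (!out.isEmpty) pending t := by
  induction t with
  | nil => intro out pending; simp [pvR]
  | cons c rest ih =>
    intro out pending
    by_cases hsep : c ∈ altSeps
    · simp only [List.foldl_cons, altStep, hsep, if_true]
      rw [ih]
      simp [pvR, hsep]
    · simp only [List.foldl_cons, altStep, hsep, if_false]
      rw [ih]
      have hne : (out ++ if pending && !out.isEmpty then [' ', c] else [c]).isEmpty = false := by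
        by_cases hp : (pending && !out.isEmpty) = true <;> simp [hp]
      rw [hne]
      simp only [pvR, hsep, if_false, Bool.not_false]
      rw [List.append_assoc]

theorem pv_scan_spec (t : List Char) (ht : t.all pvDomChar = true) :
    (∀ cur, cur ≠ [] →
      PySem.Chars.join [' '] (PySem.Chars.split₀.go (t.map pvSub) cur []) =
        cur.reverse ++ pvR true false t)
  ∧ (pvR true true t =
      if PySem.Chars.split₀.go (t.map pvSub) [] [] = [] then []
      else ' ' :: PySem.Chars.join [' '] (PySem.Chars.split₀.go (t.map pvSub) [] []))
  ∧ (∀ b, pvR false b t =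
      PySem.Chars.join [' '] (PySem.Chars.split₀.go (t.map pvSub) [] [])) := by
  induction t with
  | nil =>
    refine ⟨fun cur hcur => ?_, ?_, fun b => ?_⟩
    · rw [List.map_nil, pv_go_nil]
      simp [hcur, PySem.Chars.join_singleton, pvR]
    · rw [List.map_nil, pv_go_nil]
      simp [pvR]
    · rw [List.map_nil, pv_go_nil]
      simp [pvR, PySem.Chars.join, List.intercalate]
  | cons c t ih =>
    simp only [List.all_cons, Bool.and_eq_true] at ht
    obtain ⟨hc, ht'⟩ := ht
    obtain ⟨ih1, ih2, ih3⟩ := ih ht'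
    by_cases hsep : c ∈ altSeps
    · have hsp := pv_sep_isspace c hsep
      have hskip : ∀ acc, PySem.Chars.split₀.go ((c :: t).map pvSub) [] acc =
          PySem.Chars.split₀.go (t.map pvSub) [] acc := by
        intro acc
        rw [List.map_cons, pv_go_cons_ws _ _ _ _ hsp rfl]
      refine ⟨fun cur hcur => ?_, ?_, fun b => ?_⟩
      · rw [List.map_cons, pv_go_cons_ws' _ _ _ _ hsp hcur, pv_go_acc]
        rcases hgo : PySem.Chars.split₀.go (t.map pvSub) [] [] with _ | ⟨w, ws⟩
        · simp only [hgo, List.append_nil, List.reverse_cons, List.reverse_nil,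
            List.nil_append, PySem.Chars.join_singleton]
          simp only [pvR, hsep, if_true, ih2, hgo, ite_true, List.append_nil]
        · have hne : (w :: ws : List (List Char)) ≠ [] := by simp
          simp only [List.reverse_cons, List.reverse_nil, List.nil_append, List.singleton_append,
            PySem.Chars.join_cons_cons]
          simp only [pvR, hsep, if_true]
          rw [ih2, hgo, if_neg hne]
          simp
      · simp only [pvR, hsep, if_true, ih2, hskip]
      · simp only [pvR, hsep, if_true, ih3, hskip]
    · have hns := pv_nonsep_isspace c hc hsep
      have hsub := pv_sub_eq_self c hsep
      have key : ∀ cur, PySem.Chars.split₀.go ((c :: t).map pvSub) cur [] =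
          PySem.Chars.split₀.go (t.map pvSub) (c :: cur) [] := by
        intro cur
        rw [List.map_cons, hsub, pv_go_cons c _ _ _ (hsub ▸ hns)]
      refine ⟨fun cur hcur => ?_, ?_, fun b => ?_⟩
      · rw [key cur, ih1 (c :: cur) (by simp)]
        simp [pvR, hsep]
      · simp only [pvR, hsep, if_false, Bool.and_self, if_true]
        have hne : PySem.Chars.split₀.go ((c :: t).map pvSub) [] [] ≠ [] := by
          rw [key []]
          exact pv_go_ne (t.map pvSub) [c] (by simp)
        simp only [hne, ite_false]
        rw [key [], ih1 [c] (by simp)]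
        simp
      · simp only [pvR, hsep, if_false, Bool.and_false, Bool.false_and, if_false]
        rw [key [], ih1 [c] (by simp)]
        simp

-- ---- strip/lower commutation ----
theorem pv_isspace_comp_lower :
    (PySem.Chars.isspace ∘ PySem.Chars.lowerChar) = PySem.Chars.isspace :=
  funext pv_isspace_lowerChar

theorem pv_lower_strip (x : List Char) :
    PySem.Chars.lower (PySem.Chars.strip x) = PySem.Chars.strip (PySem.Chars.lower x) := by
  unfold PySem.Chars.strip PySem.Chars.lstrip PySem.Chars.rstrip PySem.Chars.lower
  rw [List.dropWhile_map, pv_isspace_comp_lower, ← List.map_reverse, List.dropWhile_map,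
    pv_isspace_comp_lower, ← List.map_reverse]

-- ---- the normalizers agree on the domain ----
theorem pv_canon_eq (s : String) (h : pvDomStr s = true) : altCanon s = pvNormalizeDup s := by
  have hdomL : (PySem.Chars.lower s.toList).all pvDomChar = true := by
    unfold pvDomStr at h
    rw [List.all_eq_true] at h ⊢
    intro c hc
    rcases List.mem_map.mp hc with ⟨d, hd, rfl⟩
    exact pv_domChar_lowerChar d (h d hd)
  have hB : (altCanon s).toList =
      PySem.Chars.join [' ']
        (PySem.Chars.split₀.go ((PySem.Chars.lower s.toList).map pvSub) [] []) := by
    unfold altCanon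
    rw [String.toList_ofList, PySem.Str.toList_lower, pv_scan_foldl]
    simp only [List.isEmpty_nil, Bool.not_true, List.nil_append]
    exact (pv_scan_spec _ hdomL).2.2 false
  have hclean : (PySem.Str.lower (PySem.Str.strip s)).toList =
      PySem.Chars.strip (PySem.Chars.lower s.toList) := by
    rw [PySem.Str.toList_lower, PySem.Str.toList_strip, pv_lower_strip]
  by_cases hc : PySem.Str.lower (PySem.Str.strip s) = ""
  · have hstrip : PySem.Chars.strip (PySem.Chars.lower s.toList) = [] := by
      rw [← hclean, hc]; rfl
    have hws : ∀ c ∈ PySem.Chars.lower s.toList, PySem.Chars.isspace c = true :=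
      pv_strip_nil_all_ws _ hstrip
    have hempty : (altCanon s).toList = [] := by
      rw [hB, pv_map_sub_ws _ hws, pv_go_all_ws _ _ _ hws, pv_go_nil]
      simp [PySem.Chars.join, List.intercalate]
    have hA : pvNormalizeDup s = "" := by
      unfold pvNormalizeDup pvNormalize
      simp [hc]
    rw [hA]
    exact String.ext hempty
  · have hA : pvNormalizeDup s =
        PySem.Str.join " " (PySem.Str.split₀
          (PySem.Str.replace (PySem.Str.replace (PySem.Str.lower (PySem.Str.strip s)) "_" " ") "-" " ")) := by
      unfold pvNormalizeDup pvNormalize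
      simp [hc]
    apply String.ext
    rw [hA, hB, PySem.Str.toList_join, PySem.Str.split₀_map_toList,
      PySem.Str.toList_replace, PySem.Str.toList_replace]
    have hrep : PySem.Chars.replace
        (PySem.Chars.replace (PySem.Str.lower (PySem.Str.strip s)).toList "_".toList " ".toList)
        "-".toList " ".toList =
        List.map pvSub (PySem.Chars.strip (PySem.Chars.lower s.toList)) := by
      have t1 : "_".toList = ['_'] := rfl
      have t2 : "-".toList = ['-'] := rfl
      have t3 : " ".toList = [' '] := rfl
      rw [t1, t2, t3, hclean, pv_replace_single, pv_replace_single, List.map_map]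
      refine List.map_congr_left (fun c _ => ?_)
      simp only [Function.comp_apply, pvSub]
      by_cases h1 : c = '_' <;> by_cases h2 : c = '-' <;> simp [h1, h2]
    rw [hrep, pv_split_strip]
    rfl

-- ---- outer boolean structure ----
theorem pv_step_mem (acc : PySem.Set String) (a b x : String) :
    x ∈ (if b ≠ "" then PySem.Set.add (if a ≠ "" then PySem.Set.add acc a else acc) b
         else (if a ≠ "" then PySem.Set.add acc a else acc))
    ↔ x ∈ acc ∨ (a = x ∧ x ≠ "") ∨ (b = x ∧ x ≠ "") := by
  by_cases a1 : a = "" <;> by_cases a2 : b = "" <;>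
    simp [a1, a2, PySem.Set.mem_add] <;> aesop

theorem pv_mem_lookup (nD : String → String) (l : List (String × String))
    (acc : PySem.Set String) (x : String) :
    x ∈ l.foldl (fun acc kv =>
        let nk := nD kv.1
        let nl := nD kv.2
        let acc := if nk ≠ "" then PySem.Set.add acc nk else acc
        if nl ≠ "" then PySem.Set.add acc nl else acc) acc
    ↔ x ∈ acc ∨ ∃ kv ∈ l, (nD kv.1 = x ∧ x ≠ "") ∨ (nD kv.2 = x ∧ x ≠ "") := by
  induction l generalizing acc with
  | nil => simp
  | cons kv t ih =>
    rw [List.foldl_cons]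
    refine Iff.trans (ih _) (Iff.trans
      (or_congr (pv_step_mem acc (nD kv.1) (nD kv.2) x) Iff.rfl) ?_)
    simp only [List.mem_cons]
    constructor
    · rintro ((h | hd) | ⟨kv', h', hx⟩)
      exacts [Or.inl h, Or.inr ⟨kv, Or.inl rfl, hd⟩, Or.inr ⟨kv', Or.inr h', hx⟩]
    · rintro (h | ⟨kv', (rfl | h'), hx⟩)
      exacts [Or.inl (Or.inl h), Or.inl (Or.inr hx), Or.inr ⟨kv', h', hx⟩]

theorem pv_any_congr {α : Type} (l : List α) (f g : α → Bool) (h : ∀ x ∈ l, f x = g x) :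
    l.any f = l.any g := by
  induction l with
  | nil => rfl
  | cons a t ih =>
    simp only [List.any_cons, h a (by simp)]
    rw [ih (fun x hx => h x (by simp [hx]))]

theorem pv_core (nD : String → String) (l : List (String × String)) (nck ncl : String) :
    (if (l.foldl (fun acc kv =>
          let nk := nD kv.1
          let nl := nD kv.2
          let acc := if nk ≠ "" then PySem.Set.add acc nk else acc
          if nl ≠ "" then PySem.Set.add acc nl else acc) PySem.Set.empty).isEmpty then false
     else (if nck ≠ "" then PySem.Set.contains (l.foldl (fun acc kv =>
          let nk := nD kv.1
          let nl := nD kv.2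
          let acc := if nk ≠ "" then PySem.Set.add acc nk else acc
          if nl ≠ "" then PySem.Set.add acc nl else acc) PySem.Set.empty) nck else false)
       || (if ncl ≠ "" then PySem.Set.contains (l.foldl (fun acc kv =>
          let nk := nD kv.1
          let nl := nD kv.2
          let acc := if nk ≠ "" then PySem.Set.add acc nk else acc
          if nl ≠ "" then PySem.Set.add acc nl else acc) PySem.Set.empty) ncl else false))
    = (if (PySem.Set.ofList (([nck, ncl]).filter (fun t => t ≠ ""))).isEmpty then false
       else (l.foldl (fun acc pair => acc ++ [pair.1, pair.2]) []).any
         (fun v => PySem.Set.contains (PySem.Set.ofList (([nck, ncl]).filter (fun t => t ≠ ""))) (nD v))) := by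
  have hS := fun x => (pv_mem_lookup nD l PySem.Set.empty x).trans
    (by simp [PySem.Set.empty] : (x ∈ (PySem.Set.empty : PySem.Set String) ∨
      ∃ kv ∈ l, (nD kv.1 = x ∧ x ≠ "") ∨ (nD kv.2 = x ∧ x ≠ "")) ↔
      ∃ kv ∈ l, (nD kv.1 = x ∧ x ≠ "") ∨ (nD kv.2 = x ∧ x ≠ ""))
  set S := l.foldl (fun acc kv =>
      let nk := nD kv.1
      let nl := nD kv.2
      let acc := if nk ≠ "" then PySem.Set.add acc nk else acc
      if nl ≠ "" then PySem.Set.add acc nl else acc) PySem.Set.empty with hSdef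
  set T := PySem.Set.ofList (([nck, ncl]).filter (fun t => t ≠ "")) with hTdef
  have hT : ∀ x, x ∈ T ↔ ((x = nck ∨ x = ncl) ∧ x ≠ "") := by
    intro x
    rw [hTdef, PySem.Set.mem_ofList, List.mem_filter]
    simp
  -- the membership guards absorb the emptiness guards on both sides
  have hLHS : (if S.isEmpty then false
      else (if nck ≠ "" then PySem.Set.contains S nck else false)
        || (if ncl ≠ "" then PySem.Set.contains S ncl else false))
      = ((if nck ≠ "" then PySem.Set.contains S nck else false)
        || (if ncl ≠ "" then PySem.Set.contains S ncl else false)) := by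
    by_cases hemp : S.isEmpty
    · have hSnil : S = [] := List.isEmpty_iff.mp hemp
      have c1 : PySem.Set.contains S nck = false := by
        rw [← Bool.not_eq_true, PySem.Set.contains_iff, hSnil]; simp
      have c2 : PySem.Set.contains S ncl = false := by
        rw [← Bool.not_eq_true, PySem.Set.contains_iff, hSnil]; simp
      rw [if_pos hemp, c1, c2]
      simp
    · simp [hemp]
  have hRHS : (if T.isEmpty then false
      else (l.foldl (fun acc pair => acc ++ [pair.1, pair.2]) []).any
        (fun v => PySem.Set.contains T (nD v)))
      = (l.foldl (fun acc pair => acc ++ [pair.1, pair.2]) []).any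
        (fun v => PySem.Set.contains T (nD v)) := by
    by_cases hemp : T.isEmpty
    · have hTnil : T = [] := List.isEmpty_iff.mp hemp
      have : ∀ v : String, PySem.Set.contains T (nD v) = false := fun v => by
        rw [← Bool.not_eq_true, PySem.Set.contains_iff, hTnil]; simp
      simp only [hemp, if_true]
      rw [pv_any_congr _ _ (fun _ => false) (fun v _ => this v)]
      simp
    · simp [hemp]
  rw [hLHS, hRHS, PySem.List.foldl_append_eq_flatMap, List.nil_append, Bool.eq_iff_iff]
  constructor
  · intro h
    rcases Bool.or_eq_true_iff.mp h with h' | h'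
    · have hne : nck ≠ "" := by intro hz; rw [if_neg (by simp [hz])] at h'; cases h'
      have hmem : nck ∈ S := PySem.Set.contains_iff S nck |>.mp (by simpa [hne] using h')
      rcases (hS nck).mp hmem with ⟨kv, hkv, hside⟩
      rw [List.any_eq_true]
      rcases hside with ⟨he, _⟩ | ⟨he, _⟩
      · exact ⟨kv.1, List.mem_flatMap.mpr ⟨kv, hkv, by simp⟩,
          PySem.Set.contains_iff _ _ |>.mpr ((hT (nD kv.1)).mpr ⟨Or.inl he, he ▸ hne⟩)⟩
      · exact ⟨kv.2, List.mem_flatMap.mpr ⟨kv, hkv, by simp⟩,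
          PySem.Set.contains_iff _ _ |>.mpr ((hT (nD kv.2)).mpr ⟨Or.inl he, he ▸ hne⟩)⟩
    · have hne : ncl ≠ "" := by intro hz; rw [if_neg (by simp [hz])] at h'; cases h'
      have hmem : ncl ∈ S := PySem.Set.contains_iff S ncl |>.mp (by simpa [hne] using h')
      rcases (hS ncl).mp hmem with ⟨kv, hkv, hside⟩
      rw [List.any_eq_true]
      rcases hside with ⟨he, _⟩ | ⟨he, _⟩
      · exact ⟨kv.1, List.mem_flatMap.mpr ⟨kv, hkv, by simp⟩,
          PySem.Set.contains_iff _ _ |>.mpr ((hT (nD kv.1)).mpr ⟨Or.inr he, he ▸ hne⟩)⟩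
      · exact ⟨kv.2, List.mem_flatMap.mpr ⟨kv, hkv, by simp⟩,
          PySem.Set.contains_iff _ _ |>.mpr ((hT (nD kv.2)).mpr ⟨Or.inr he, he ▸ hne⟩)⟩
  · intro h
    rcases List.any_eq_true.mp h with ⟨v, hv, hcon⟩
    rcases List.mem_flatMap.mp hv with ⟨kv, hkv, hvkv⟩
    have hTv := (hT (nD v)).mp (PySem.Set.contains_iff _ _ |>.mp hcon)
    have hside : (v = kv.1 ∨ v = kv.2) := by simpa using hvkv
    rcases hTv with ⟨htar, hne⟩
    rcases htar with he | he
    · -- nD v = nck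
      have hnck : nck ≠ "" := he ▸ hne
      have hmem : nck ∈ S := (hS nck).mpr ⟨kv, hkv, by
        rcases hside with rfl | rfl
        · exact Or.inl ⟨he, hnck⟩
        · exact Or.inr ⟨he, hnck⟩⟩
      apply Bool.or_eq_true_iff.mpr
      left
      simp [hnck, PySem.Set.contains_iff, hmem]
    · have hncl : ncl ≠ "" := he ▸ hne
      have hmem : ncl ∈ S := (hS ncl).mpr ⟨kv, hkv, by
        rcases hside with rfl | rfl
        · exact Or.inl ⟨he, hncl⟩
        · exact Or.inr ⟨he, hncl⟩⟩
      apply Bool.or_eq_true_iff.mpr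
      right
      simp [hncl, PySem.Set.contains_iff, hmem]

-- ---- domain bookkeeping for the main theorem ----
theorem pv_dom_clean (s : String) (h : pvDomStr s = true) :
    pvDomStr (PySem.Str.lower (PySem.Str.strip s)) = true := by
  unfold pvDomStr at *
  rw [PySem.Str.toList_lower, PySem.Str.toList_strip]
  rw [List.all_eq_true] at h ⊢
  intro c hc
  rcases List.mem_map.mp hc with ⟨d, hd, rfl⟩
  refine pv_domChar_lowerChar d (h d ?_)
  unfold PySem.Chars.strip PySem.Chars.rstrip PySem.Chars.lstrip at hd
  have h1 := List.dropWhile_sublist (p := PySem.Chars.isspace)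
    (l := (List.dropWhile PySem.Chars.isspace s.toList).reverse)
  have h2 := List.dropWhile_sublist (p := PySem.Chars.isspace) (l := s.toList)
  have := (h1.reverse.subset (List.mem_reverse.mpr (by simpa using hd)))
  exact h2.subset (by simpa using this)

theorem pv_dom_slice (s : String) (a : Int) (ha : 0 ≤ a) (h : pvDomStr s = true) :
    pvDomStr (PySem.Str.slice s (some a) none) = true := by
  unfold pvDomStr at *
  rw [PySem.Str.toList_slice]
  rw [List.all_eq_true] at h ⊢
  intro c hc
  refine h c ?_
  unfold PySem.Chars.slice at hc
  rw [PySem.List.slice_from _ ha] at hc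
  exact List.drop_subset _ _ hc

-- ===== VERDICT (by name: the statement is the Claim_ definition above) =====
theorem is_meu_perfil_builtin_duplicate_field_spec : Claim_equal_is_meu_perfil_builtin_duplicate_field := by
  intro field_key field_label builtin_field_labels hdom
  unfold Dom_is_meu_perfil_builtin_duplicate_field at hdom
  simp only [Bool.and_eq_true] at hdom
  obtain ⟨⟨hdk, hdl⟩, hdb⟩ := hdom
  unfold Spec_is_meu_perfil_builtin_duplicate_field
  unfold is_meu_perfil_builtin_duplicate_field is_meu_perfil_builtin_duplicate_field_alt
  by_cases hsw : PySem.Str.startswith (PySem.Str.lower (PySem.Str.strip field_key)) "custom_" = true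
  · simp only [hsw, Bool.not_true, Bool.false_eq_true, if_false]
    have hrp : pyRemoveprefix (PySem.Str.lower (PySem.Str.strip field_key)) "custom_" =
        PySem.Str.slice (PySem.Str.lower (PySem.Str.strip field_key))
          (some (PySem.Str.len "custom_" : Int)) none := by
      unfold pyRemoveprefix
      rw [if_pos hsw]
    have hdslice : pvDomStr (PySem.Str.slice (PySem.Str.lower (PySem.Str.strip field_key))
        (some (PySem.Str.len "custom_" : Int)) none) = true :=
      pv_dom_slice _ _ (Int.natCast_nonneg _) (pv_dom_clean field_key hdk)
    have e1 : altCanon (PySem.Str.slice (PySem.Str.lower (PySem.Str.strip field_key))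
        (some (PySem.Str.len "custom_" : Int)) none) =
        pvNormalizeDup (PySem.Str.slice (PySem.Str.lower (PySem.Str.strip field_key))
        (some (PySem.Str.len "custom_" : Int)) none) := pv_canon_eq _ hdslice
    have e2 : altCanon field_label = pvNormalizeDup field_label := pv_canon_eq _ hdl
    have hpair : ∀ kv ∈ builtin_field_labels.getD [],
        pvDomStr kv.1 = true ∧ pvDomStr kv.2 = true := by
      intro kv hkv
      cases builtin_field_labels with
      | none => simp at hkv
      | some xs =>
        simp only [Option.map_some, Option.getD_some] at hdb hkv
        have := (List.all_eq_true.mp hdb) kv hkv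
        simpa [Bool.and_eq_true] using this
    have hany : ∀ (T : PySem.Set String),
        ((builtin_field_labels.getD []).foldl (fun acc pair => acc ++ [pair.1, pair.2]) []).any
          (fun value => PySem.Set.contains T (altCanon value)) =
        ((builtin_field_labels.getD []).foldl (fun acc pair => acc ++ [pair.1, pair.2]) []).any
          (fun value => PySem.Set.contains T (pvNormalizeDup value)) := by
      intro T
      refine pv_any_congr _ _ _ (fun v hv => ?_)
      rw [PySem.List.foldl_append_eq_flatMap, List.nil_append] at hv
      rcases List.mem_flatMap.mp hv with ⟨kv, hkv, hvkv⟩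
      have hdv : pvDomStr v = true := by
        rcases (by simpa using hvkv : v = kv.1 ∨ v = kv.2) with rfl | rfl
        · exact (hpair kv hkv).1
        · exact (hpair kv hkv).2
      rw [pv_canon_eq v hdv]
    rw [hrp, e1, e2, hany]
    exact pv_core pvNormalizeDup (builtin_field_labels.getD []) _ _
  · have hsw' : PySem.Str.startswith (PySem.Str.lower (PySem.Str.strip field_key)) "custom_" = false := by
      simpa using hsw
    simp only [hsw', Bool.not_false, if_true]
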